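-- pv_equiv track=rewrite | github.com/dhruvguptax/clustered-subset-count | clustered_subset_count.py | clustered_subset_count
-- ===== SOURCE A (Python) =====
-- import itertools
--
-- def is_clustered(subset, d):
--     """
--     Check if a given subset is clustered with distance d.
--     A subset is clustered if every element has at least
--     one other element within distance <= d.
--     """
--     for i in range(len(subset)):
--         has_neighbor = any(
--             i != j and abs(subset[i] - subset[j]) <= d
--             for j in range(len(subset))
--         )
--         if not has_neighbor:
--             return False
--     return True
--
-- def clustered_subset_count(n, k, d):
--     """
--     Computes C(n, k; d) = number of size-k clustered subsets of {1..n}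
--     """
--     base_set = list(range(1, n + 1))
--     all_subsets = itertools.combinations(base_set, k)
--     count = 0
--
--     for subset in all_subsets:
--         if is_clustered(subset, d):
--             count += 1
--
--     return count
-- ===== SOURCE B (Python) =====
-- def clustered_subset_count(n, k, d):
--     """
--     Computes C(n, k; d) = number of size-k clustered subsets of {1..n}
--     by a bottom-up DP over the last chosen position (with suffix sums)
--     instead of enumerating all C(n, k) subsets.
--     fT[b] / fF[b] = number of ways to pick the remaining elements from
--     {b+1..n} when b is the last chosen element and b's neighbor
--     requirement is already met (T) / not yet met (F).
--     """
--     if k == 0: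
--         return 1
--     if k > n:
--         return 0
--     fT = [1] * (n + 2)  # 0 more elements to pick: ok iff b is satisfied
--     fF = [0] * (n + 2)
--     for _ in range(k - 1):
--         sT = [0] * (n + 2)  # sT[i] = fT[i] + ... + fT[n], sF likewise
--         sF = [0] * (n + 2)
--         for c in range(n, 0, -1):
--             sT[c] = sT[c + 1] + fT[c]
--             sF[c] = sF[c + 1] + fF[c]
--         nT = [0] * (n + 2)
--         nF = [0] * (n + 2)
--         for b in range(1, n + 1):
--             hi = min(b + d, n)  # last candidate within distance d of b
--             if hi >= b + 1:
--                 near = sT[b + 1] - sT[hi + 1]  # next element within d: both satisfied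
--                 far = sF[hi + 1]  # next element beyond d: it starts unsatisfied
--             else:
--                 near = 0
--                 far = sF[b + 1]
--             nT[b] = near + far
--             nF[b] = near  # b still needs a neighbor: next element must be within d
--         fT = nT
--         fF = nF
--     return sum(fF[x] for x in range(1, n + 1))
-- ===== Notes on version B (the rewrite author's own statement) =====
-- stated objective: faster
-- what changed: Replaces A's enumeration of all C(n,k) subsets with an O(k^2)-per-subset neighbor check by a bottom-up DP over the last chosen position (suffix-sum accelerated) tracking whether that element already has a neighbor within d; intended as asymptotically faster and measured well above 1.5x at the largest size where both finished, though unconfirmed in a timing run beyond that (both sides time out on some of the largest random inputs).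
-- outside the precondition, e.g. on clustered_subset_count(5, -1, 2): A raises ValueError, B returns 0
import Mathlib
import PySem

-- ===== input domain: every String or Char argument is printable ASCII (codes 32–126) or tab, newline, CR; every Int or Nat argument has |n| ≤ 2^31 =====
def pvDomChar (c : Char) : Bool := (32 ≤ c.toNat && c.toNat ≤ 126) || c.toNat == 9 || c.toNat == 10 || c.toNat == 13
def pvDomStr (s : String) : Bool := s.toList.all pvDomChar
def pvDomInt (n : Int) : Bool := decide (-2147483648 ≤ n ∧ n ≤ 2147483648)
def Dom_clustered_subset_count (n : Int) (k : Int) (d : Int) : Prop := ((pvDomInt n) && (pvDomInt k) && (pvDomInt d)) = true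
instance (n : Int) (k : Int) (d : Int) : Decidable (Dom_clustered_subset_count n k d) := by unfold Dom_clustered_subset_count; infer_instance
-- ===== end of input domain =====

-- B replaces A's enumeration of all C(n,k) subsets by a bottom-up DP over the last
-- chosen position (with suffix sums) tracking whether it already has a neighbor within d.


-- ===== PORT A =====
-- itertools.combinations of a list, in itertools' (lexicographic) order
def pvComb : List Int → Nat → List (List Int)
  | _, 0 => [[]]
  | [], _ + 1 => []
  | x :: xs, kk + 1 => (pvComb xs kk).map (x :: ·) ++ pvComb xs (kk + 1)

-- is_clustered: for every index i, some other index j with |subset[i]-subset[j]| <= d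
-- (the early `return False` of the Python loop is exactly `List.all`)
def pvIsClustered (subset : List Int) (d : Int) : Bool :=
  (List.range subset.length).all fun i =>
    (List.range subset.length).any fun j =>
      decide (i ≠ j) && decide (|subset.getD i 0 - subset.getD j 0| ≤ d)

def clustered_subset_count (n : Int) (k : Int) (d : Int) : Int :=
  (pvComb (PySem.List.pyRange 1 (n + 1) 1) k.toNat).foldl
    (fun count s => if pvIsClustered s d then count + 1 else count) 0

-- ===== PORT B =====
-- bottom-up DP: fT/fF at index b = number of ways to pick the remaining elements
-- from {b+1..n} when b is the last chosen element and b's neighbor requirement is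
-- already met (fT) / not yet met (fF); one level per extra element, via suffix sums
def clustered_subset_count_alt (n : Int) (k : Int) (d : Int) : Int :=
  if k = 0 then 1
  else if n < k then 0
  else
    let m := (n + 2).toNat
    let fin := (PySem.List.pyRange 0 (k - 1) 1).foldl
      (fun (ff : List Int × List Int) _ =>
        let s := (PySem.List.pyRange n 0 (-1)).foldl
          (fun (st : List Int × List Int) c =>
            (st.1.set c.toNat (st.1.getD (c + 1).toNat 0 + ff.1.getD c.toNat 0),
             st.2.set c.toNat (st.2.getD (c + 1).toNat 0 + ff.2.getD c.toNat 0)))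
          (List.replicate m 0, List.replicate m 0)
        (PySem.List.pyRange 1 (n + 1) 1).foldl
          (fun (nf : List Int × List Int) b =>
            let hi := min (b + d) n
            let near := if b + 1 ≤ hi then s.1.getD (b + 1).toNat 0 - s.1.getD (hi + 1).toNat 0 else 0
            let far := if b + 1 ≤ hi then s.2.getD (hi + 1).toNat 0 else s.2.getD (b + 1).toNat 0
            (nf.1.set b.toNat (near + far), nf.2.set b.toNat near))
          (List.replicate m 0, List.replicate m 0))
      (List.replicate m 1, List.replicate m 0)
    (PySem.List.pyRange 1 (n + 1) 1).foldl (fun acc x => acc + fin.2.getD x.toNat 0) 0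


-- ===== PRECONDITION & SPEC =====
-- Pre_ excludes only k < 0, where Python's itertools.combinations raises ValueError.
def Pre_clustered_subset_count (n : Int) (k : Int) (d : Int) : Prop := 0 ≤ k
instance (n : Int) (k : Int) (d : Int) : Decidable (Pre_clustered_subset_count n k d) := by
  unfold Pre_clustered_subset_count; infer_instance

def pvWitness_clustered_subset_count : Int × Int × Int := (4, 2, 1)

def Spec_clustered_subset_count (n : Int) (k : Int) (d : Int) (out : Int) : Prop := out = clustered_subset_count_alt n k d
instance (n : Int) (k : Int) (d : Int) (out : Int) : Decidable (Spec_clustered_subset_count n k d out) := by unfold Spec_clustered_subset_count; infer_instance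

-- ===== CLAIM (what is proved, stated in full; the proofs are below) =====
def Claim_equal_clustered_subset_count : Prop := ∀ (n : Int) (k : Int) (d : Int), Dom_clustered_subset_count n k d → Pre_clustered_subset_count n k d → Spec_clustered_subset_count n k d (clustered_subset_count n k d)

-- ===== LEMMAS AND PROOFS =====

-- the DP recursion both programs are shown to compute:
-- pvF n d kk b sat = number of clustered ways to extend by kk elements of {b+1..n}
def pvF (n d : Int) : Nat → Int → Bool → Int
  | 0, _, sat => if sat then 1 else 0
  | kk + 1, b, sat =>
    (PySem.List.pyRange (b + 1) (n + 1) 1).foldl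
      (fun total c =>
        if c - b ≤ d then total + pvF n d kk c true
        else if sat then total + pvF n d kk c false
        else total) 0


-- ===== LEMMAS AND PROOFS =====

-- "index i of s has a neighbor within d" for a sorted list, stated on adjacent gaps
def pvAdjSat (d : Int) (s : List Int) : Nat → Prop
  | 0 => 1 < s.length ∧ s.getD 1 0 - s.getD 0 0 ≤ d
  | i + 1 => s.getD (i + 1) 0 - s.getD i 0 ≤ d ∨
      (i + 2 < s.length ∧ s.getD (i + 2) 0 - s.getD (i + 1) 0 ≤ d)

-- structural clustered check with a "first element already satisfied" flag
def pvOkFrom (d : Int) : Bool → Int → List Int → Bool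
  | sat, _, [] => sat
  | sat, b, c :: t => if c - b ≤ d then pvOkFrom d true c t else sat && pvOkFrom d false c t

-- the clustered predicate in structural form
def pvClusB (d : Int) : List Int → Bool
  | [] => true
  | y :: u => pvOkFrom d false y u

-- list-structured version of pvF (recursion over the remaining candidate list)
def pvG (d : Int) : Nat → Int → Bool → List Int → Int
  | 0, _, sat, _ => if sat then 1 else 0
  | _ + 1, _, _, [] => 0
  | kk + 1, b, sat, c :: l =>
      (if c - b ≤ d then pvG d kk c true l
       else if sat then pvG d kk c false l else 0) + pvG d (kk + 1) b sat l

lemma pvComb_mem {l : List Int} {K : Nat} {t : List Int} (h : t ∈ pvComb l K) :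
    t.Sublist l ∧ t.length = K := by
  induction l generalizing K t with
  | nil => cases K with
    | zero => simp [pvComb] at h; simp [h]
    | succ kk => simp [pvComb] at h
  | cons x xs ih =>
    cases K with
    | zero => simp [pvComb] at h; simp [h]
    | succ kk =>
      simp only [pvComb, List.mem_append, List.mem_map] at h
      rcases h with ⟨t', ht', rfl⟩ | h
      · obtain ⟨hs, hl⟩ := ih ht'
        exact ⟨List.Sublist.cons₂ _ hs, by simp [hl]⟩
      · obtain ⟨hs, hl⟩ := ih h
        exact ⟨hs.cons _, hl⟩

lemma pvIsClustered_iff (s : List Int) (d : Int) :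
    pvIsClustered s d = true ↔
      ∀ i < s.length, ∃ j < s.length, i ≠ j ∧ |s.getD i 0 - s.getD j 0| ≤ d := by
  simp [pvIsClustered, List.all_eq_true, List.any_eq_true, List.mem_range]

lemma pvGetD_lt {s : List Int} (hp : List.Pairwise (· < ·) s) {p q : Nat}
    (hpq : p < q) (hq : q < s.length) : s.getD p 0 < s.getD q 0 := by
  rw [List.getD_eq_getElem s 0 (by omega), List.getD_eq_getElem s 0 hq]
  exact List.pairwise_iff_getElem.mp hp p q (by omega) hq hpq

lemma pvGetD_le {s : List Int} (hp : List.Pairwise (· < ·) s) {p q : Nat}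
    (hpq : p ≤ q) (hq : q < s.length) : s.getD p 0 ≤ s.getD q 0 := by
  rcases Nat.lt_or_ge p q with h | h
  · exact le_of_lt (pvGetD_lt hp h hq)
  · have : p = q := by omega
    simp [this]

-- on a sorted list the nearest other element is an adjacent one
lemma pvNbr_iff_adj {s : List Int} {d : Int} (hp : List.Pairwise (· < ·) s)
    {i : Nat} (hi : i < s.length) :
    (∃ j < s.length, i ≠ j ∧ |s.getD i 0 - s.getD j 0| ≤ d) ↔ pvAdjSat d s i := by
  constructor
  · rintro ⟨j, hj, hne, habs⟩
    rw [abs_le] at habs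
    rcases Nat.lt_or_ge j i with hji | hji
    · obtain ⟨i', rfl⟩ : ∃ i', i = i' + 1 := ⟨i - 1, by omega⟩
      have h1 : s.getD j 0 ≤ s.getD i' 0 := pvGetD_le hp (by omega) (by omega)
      have h2 : s.getD j 0 < s.getD (i' + 1) 0 := pvGetD_lt hp hji hi
      exact Or.inl (by omega)
    · have hij : i < j := by omega
      have h2 : s.getD i 0 < s.getD j 0 := pvGetD_lt hp hij hj
      have h1 : s.getD (i + 1) 0 ≤ s.getD j 0 := pvGetD_le hp (by omega) hj
      cases i with
      | zero =>
        have h1' : s.getD 1 0 ≤ s.getD j 0 := h1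
        exact ⟨by omega, by omega⟩
      | succ i' =>
        have h1' : s.getD (i' + 2) 0 ≤ s.getD j 0 := h1
        exact Or.inr ⟨by omega, by omega⟩
  · intro hadj
    cases i with
    | zero =>
      obtain ⟨hlen, hgap⟩ := hadj
      refine ⟨1, hlen, by omega, ?_⟩
      have := pvGetD_lt hp (show 0 < 1 by omega) hlen
      rw [abs_le]; omega
    | succ i' =>
      rcases hadj with hgap | ⟨hlen, hgap⟩
      · refine ⟨i', by omega, by omega, ?_⟩
        have := pvGetD_lt hp (show i' < i' + 1 by omega) hi
        rw [abs_le]; omega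
      · refine ⟨i' + 2, hlen, by omega, ?_⟩
        have := pvGetD_lt hp (show i' + 1 < i' + 2 by omega) hlen
        rw [abs_le]; omega

lemma pvAdjSat_shift (d b : Int) (u : List Int) (i : Nat) :
    pvAdjSat d (b :: u) (i + 2) ↔ pvAdjSat d u (i + 1) := by
  simp only [pvAdjSat, List.getD_cons_succ, List.length_cons]
  constructor <;> (rintro (h | ⟨h1, h2⟩) <;> [exact Or.inl h; exact Or.inr ⟨by omega, h2⟩])

lemma pvOkFrom_iff (d : Int) :
    ∀ (t : List Int) (b : Int) (sat : Bool),
      pvOkFrom d sat b t = true ↔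
        ∀ i < (b :: t).length, (i = 0 ∧ sat = true) ∨ pvAdjSat d (b :: t) i := by
  intro t
  induction t with
  | nil =>
    intro b sat
    simp only [pvOkFrom, List.length_cons, List.length_nil]
    constructor
    · intro hs i hi
      interval_cases i
      exact Or.inl ⟨rfl, hs⟩
    · intro h
      rcases h 0 (by omega) with ⟨_, hs⟩ | hadj
      · exact hs
      · simp [pvAdjSat] at hadj
  | cons c t ih =>
    intro b sat
    simp only [pvOkFrom]
    by_cases hcb : c - b ≤ d
    · rw [if_pos hcb, ih c true]
      constructor
      · intro h i hi
        match i with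
        | 0 => exact Or.inr ⟨by simp, by simpa using hcb⟩
        | 1 => exact Or.inr (Or.inl (by simpa using hcb))
        | i + 2 =>
          rcases h (i + 1) (by simpa using hi) with ⟨h0, _⟩ | hadj
          · omega
          · exact Or.inr ((pvAdjSat_shift d b (c :: t) i).mpr hadj)
      · intro h i hi
        match i with
        | 0 => exact Or.inl ⟨rfl, rfl⟩
        | i + 1 =>
          rcases h (i + 2) (by simpa using hi) with ⟨h0, _⟩ | hadj
          · omega
          · exact Or.inr ((pvAdjSat_shift d b (c :: t) i).mp hadj)
    · rw [if_neg hcb]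
      rw [Bool.and_eq_true, ih c false]
      constructor
      · rintro ⟨hsat, h⟩ i hi
        match i with
        | 0 => exact Or.inl ⟨rfl, hsat⟩
        | 1 =>
          rcases h 0 (by simp) with ⟨_, hf⟩ | hadj
          · simp at hf
          · obtain ⟨hl, hg⟩ := hadj
            exact Or.inr (Or.inr ⟨by simpa using hl, by simpa using hg⟩)
        | i + 2 =>
          rcases h (i + 1) (by simpa using hi) with ⟨h0, _⟩ | hadj
          · omega
          · exact Or.inr ((pvAdjSat_shift d b (c :: t) i).mpr hadj)
      · intro h
        have hsat : sat = true := by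
          rcases h 0 (by simp) with ⟨_, hs⟩ | hadj
          · exact hs
          · obtain ⟨_, hg⟩ := hadj
            simp at hg
            omega
        refine ⟨hsat, fun i hi => ?_⟩
        match i with
        | 0 =>
          rcases h 1 (by simp) with ⟨h0, _⟩ | hadj
          · omega
          · rcases hadj with hg | ⟨hl, hg⟩
            · simp at hg; omega
            · exact Or.inr ⟨by simpa using hl, by simpa using hg⟩
        | i + 1 =>
          rcases h (i + 2) (by simpa using hi) with ⟨h0, _⟩ | hadj
          · omega
          · exact Or.inr ((pvAdjSat_shift d b (c :: t) i).mp hadj)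

-- A's quadratic check equals the structural check on a sorted nonempty list
lemma pvIsClustered_eq_okFrom {x : Int} {t : List Int} {d : Int}
    (hp : List.Pairwise (· < ·) (x :: t)) :
    pvIsClustered (x :: t) d = pvOkFrom d false x t := by
  have h3 : pvIsClustered (x :: t) d = true ↔ pvOkFrom d false x t = true := by
    rw [pvIsClustered_iff, pvOkFrom_iff]
    apply forall_congr'; intro i
    apply imp_congr_right; intro hi
    rw [pvNbr_iff_adj hp hi]
    simp
  exact Bool.coe_iff_coe.mp h3

-- counting clustered extensions over combinations equals the list recursion pvG
lemma pvCountP_comb (d : Int) :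
    ∀ (l : List Int) (kk : Nat) (b : Int) (sat : Bool),
      ((pvComb l kk).countP (fun t => pvOkFrom d sat b t) : Int) = pvG d kk b sat l := by
  intro l
  induction l with
  | nil =>
    intro kk b sat
    cases kk with
    | zero => simp [pvComb, pvG, List.countP_cons, pvOkFrom]
    | succ kk => simp [pvComb, pvG]
  | cons c l ih =>
    intro kk b sat
    cases kk with
    | zero => simp [pvComb, pvG, List.countP_cons, pvOkFrom]
    | succ kk =>
      simp only [pvComb, List.countP_append, List.countP_map, pvG]
      push_cast
      rw [← ih (kk + 1) b sat]
      congr 1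
      · by_cases hcb : c - b ≤ d
        · rw [← ih kk c true]
          simp only [hcb, if_true]
          congr 1
          apply List.countP_congr
          intro t _
          simp [Function.comp, pvOkFrom, hcb]
        · simp only [hcb, if_false]
          cases sat with
          | true =>
            rw [← ih kk c false]
            simp only [if_true]
            congr 1
            apply List.countP_congr
            intro t _
            simp [Function.comp, pvOkFrom, hcb]
          | false =>
            simp only [Bool.false_eq_true, if_false]
            have : List.countP ((fun t => pvOkFrom d false b t) ∘ (c :: ·)) (pvComb l kk) = 0 := by
              apply List.countP_eq_zero.mpr
              intro t _
              simp [Function.comp, pvOkFrom, hcb]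
            simp [this]

-- walk lemma: with the IH for kk available, pvG (kk+1) over a tail range equals B's fold
lemma pvG_walk (n d : Int) (kk : Nat) (b : Int) (sat : Bool)
    (ihk : ∀ (c : Int) (s' : Bool), pvG d kk c s' (PySem.List.pyRange (c + 1) (n + 1) 1) = pvF n d kk c s') :
    ∀ (m : Nat) (a : Int), (n + 1 - a).toNat = m →
      pvG d (kk + 1) b sat (PySem.List.pyRange a (n + 1) 1) =
      (PySem.List.pyRange a (n + 1) 1).foldl
        (fun total c =>
          if c - b ≤ d then total + pvF n d kk c true
          else if sat then total + pvF n d kk c false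
          else total) 0 := by
  intro m
  induction m with
  | zero =>
    intro a ha
    rw [PySem.List.pyRange_one_eq_nil (by omega)]
    simp [pvG]
  | succ m ihm =>
    intro a ha
    have hlt : a < n + 1 := by omega
    rw [PySem.List.pyRange_one_cons hlt]
    simp only [pvG, List.foldl_cons]
    rw [ihm (a + 1) (by omega)]
    have hstep : ∀ (init : Int) (l : List Int),
        l.foldl (fun total c =>
          if c - b ≤ d then total + pvF n d kk c true
          else if sat then total + pvF n d kk c false
          else total) init
        = init + l.foldl (fun total c =>
          if c - b ≤ d then total + pvF n d kk c true
          else if sat then total + pvF n d kk c false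
          else total) 0 := by
      intro init l
      have hfun : (fun (total : Int) (c : Int) =>
          if c - b ≤ d then total + pvF n d kk c true
          else if sat then total + pvF n d kk c false
          else total) = fun total c => total +
            (if c - b ≤ d then pvF n d kk c true
             else if sat then pvF n d kk c false else 0) := by
        funext total c
        split_ifs <;> simp
      rw [hfun, PySem.List.foldl_add, PySem.List.foldl_add]
      simp
    conv_rhs => rw [hstep]
    rw [ihk a true, ihk a false]
    split_ifs <;> simp

-- pvG on a contiguous range equals port B's pvF
lemma pvG_eq_pvF (n d : Int) :
    ∀ (kk : Nat) (b : Int) (sat : Bool),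
      pvG d kk b sat (PySem.List.pyRange (b + 1) (n + 1) 1) = pvF n d kk b sat := by
  intro kk
  induction kk with
  | zero => intro b sat; simp [pvF, pvG]
  | succ kk ihk =>
    intro b sat
    rw [pvF]
    exact pvG_walk n d kk b sat ihk (n + 1 - (b + 1)).toNat (b + 1) rfl

-- the top-level loop of B over first elements equals the count over combinations
lemma pvTop_walk (n d : Int) (kk : Nat) :
    ∀ (m : Nat) (a : Int), (n + 1 - a).toNat = m →
      ((pvComb (PySem.List.pyRange a (n + 1) 1) (kk + 1)).countP (pvClusB d) : Int) =
      (PySem.List.pyRange a (n + 1) 1).foldl (fun acc x => acc + pvF n d kk x false) 0 := by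
  intro m
  induction m with
  | zero =>
    intro a ha
    rw [PySem.List.pyRange_one_eq_nil (by omega)]
    simp [pvComb]
  | succ m ihm =>
    intro a ha
    have hlt : a < n + 1 := by omega
    rw [PySem.List.pyRange_one_cons hlt]
    simp only [pvComb, List.countP_append, List.countP_map, List.foldl_cons]
    push_cast
    rw [PySem.List.foldl_add]
    have h1 : (List.countP (pvClusB d ∘ (a :: ·)) (pvComb (PySem.List.pyRange (a + 1) (n + 1) 1) kk) : Int)
        = pvF n d kk a false := by
      have : (pvClusB d ∘ (a :: ·)) = (fun t => pvOkFrom d false a t) := by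
        funext t; simp [Function.comp, pvClusB]
      rw [this, pvCountP_comb, pvG_eq_pvF]
    have h2 := ihm (a + 1) (by omega)
    rw [PySem.List.foldl_add] at h2
    omega

lemma pvComb_eq_nil {l : List Int} {K : Nat} (h : l.length < K) : pvComb l K = [] := by
  induction l generalizing K with
  | nil => cases K with
    | zero => simp at h
    | succ kk => rfl
  | cons x xs ih =>
    cases K with
    | zero => simp at h
    | succ kk =>
      simp only [pvComb]
      rw [ih (by simpa using h), ih (by simp at h; omega)]
      rfl

def pvSumT (n d : Int) (j : Nat) (i : Int) : Int :=
  ((PySem.List.pyRange i (n + 1) 1).map (fun c => pvF n d j c true)).sum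
def pvSumF (n d : Int) (j : Nat) (i : Int) : Int :=
  ((PySem.List.pyRange i (n + 1) 1).map (fun c => pvF n d j c false)).sum

lemma pvF_succ_sum (n d : Int) (j : Nat) (b : Int) (sat : Bool) :
    pvF n d (j + 1) b sat =
      ((PySem.List.pyRange (b + 1) (n + 1) 1).map
        (fun c => if c - b ≤ d then pvF n d j c true
                  else if sat then pvF n d j c false else 0)).sum := by
  rw [pvF]
  have hfun : (fun (total : Int) (c : Int) =>
      if c - b ≤ d then total + pvF n d j c true
      else if sat then total + pvF n d j c false
      else total) = fun total c => total +
        (if c - b ≤ d then pvF n d j c true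
         else if sat then pvF n d j c false else 0) := by
    funext total c
    split_ifs <;> simp
  rw [hfun, PySem.List.foldl_add]
  simp

lemma pvF_true_split (n d : Int) (j : Nat) (b : Int) :
    pvF n d (j + 1) b true =
      (if b + 1 ≤ min (b + d) n
       then pvSumT n d j (b + 1) - pvSumT n d j (min (b + d) n + 1) + pvSumF n d j (min (b + d) n + 1)
       else pvSumF n d j (b + 1)) := by
  rw [pvF_succ_sum]
  by_cases hc : b + 1 ≤ min (b + d) n
  · rw [if_pos hc]
    set hi := min (b + d) n with hhi
    have hsplit : PySem.List.pyRange (b + 1) (n + 1) 1 =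
        PySem.List.pyRange (b + 1) (hi + 1) 1 ++ PySem.List.pyRange (hi + 1) (n + 1) 1 :=
      PySem.List.pyRange_one_append _ _ _ (by omega) (by omega)
    have hTsplit : pvSumT n d j (b + 1) =
        ((PySem.List.pyRange (b + 1) (hi + 1) 1).map (fun c => pvF n d j c true)).sum +
          pvSumT n d j (hi + 1) := by
      rw [pvSumT, hsplit, List.map_append, List.sum_append]; rfl
    have hnear : (PySem.List.pyRange (b + 1) (hi + 1) 1).map
        (fun c => if c - b ≤ d then pvF n d j c true
                  else if true then pvF n d j c false else 0) =
        (PySem.List.pyRange (b + 1) (hi + 1) 1).map (fun c => pvF n d j c true) := by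
      apply List.map_congr_left
      intro c hcmem
      rw [PySem.List.mem_pyRange_one] at hcmem
      have : c - b ≤ d := by omega
      simp [this]
    have hfar : (PySem.List.pyRange (hi + 1) (n + 1) 1).map
        (fun c => if c - b ≤ d then pvF n d j c true
                  else if true then pvF n d j c false else 0) =
        (PySem.List.pyRange (hi + 1) (n + 1) 1).map (fun c => pvF n d j c false) := by
      apply List.map_congr_left
      intro c hcmem
      rw [PySem.List.mem_pyRange_one] at hcmem
      have : ¬ (c - b ≤ d) := by omega
      simp [this]
    rw [hsplit, List.map_append, List.sum_append, hnear, hfar, hTsplit, pvSumF]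
    ring
  · rw [if_neg hc]
    have hall : (PySem.List.pyRange (b + 1) (n + 1) 1).map
        (fun c => if c - b ≤ d then pvF n d j c true
                  else if true then pvF n d j c false else 0) =
        (PySem.List.pyRange (b + 1) (n + 1) 1).map (fun c => pvF n d j c false) := by
      apply List.map_congr_left
      intro c hcmem
      rw [PySem.List.mem_pyRange_one] at hcmem
      have : ¬ (c - b ≤ d) := by omega
      simp [this]
    rw [hall, pvSumF]

lemma pvF_false_split (n d : Int) (j : Nat) (b : Int) :
    pvF n d (j + 1) b false =
      (if b + 1 ≤ min (b + d) n
       then pvSumT n d j (b + 1) - pvSumT n d j (min (b + d) n + 1)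
       else 0) := by
  rw [pvF_succ_sum]
  by_cases hc : b + 1 ≤ min (b + d) n
  · rw [if_pos hc]
    set hi := min (b + d) n with hhi
    have hsplit : PySem.List.pyRange (b + 1) (n + 1) 1 =
        PySem.List.pyRange (b + 1) (hi + 1) 1 ++ PySem.List.pyRange (hi + 1) (n + 1) 1 :=
      PySem.List.pyRange_one_append _ _ _ (by omega) (by omega)
    have hTsplit : pvSumT n d j (b + 1) =
        ((PySem.List.pyRange (b + 1) (hi + 1) 1).map (fun c => pvF n d j c true)).sum +
          pvSumT n d j (hi + 1) := by
      rw [pvSumT, hsplit, List.map_append, List.sum_append]; rfl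
    have hnear : (PySem.List.pyRange (b + 1) (hi + 1) 1).map
        (fun c => if c - b ≤ d then pvF n d j c true
                  else if false then pvF n d j c false else 0) =
        (PySem.List.pyRange (b + 1) (hi + 1) 1).map (fun c => pvF n d j c true) := by
      apply List.map_congr_left
      intro c hcmem
      rw [PySem.List.mem_pyRange_one] at hcmem
      have : c - b ≤ d := by omega
      simp [this]
    have hfar : (PySem.List.pyRange (hi + 1) (n + 1) 1).map
        (fun c => if c - b ≤ d then pvF n d j c true
                  else if false then pvF n d j c false else 0) =
        (PySem.List.pyRange (hi + 1) (n + 1) 1).map (fun _ => (0 : Int)) := by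
      apply List.map_congr_left
      intro c hcmem
      rw [PySem.List.mem_pyRange_one] at hcmem
      have : ¬ (c - b ≤ d) := by omega
      simp [this]
    rw [hsplit, List.map_append, List.sum_append, hnear, hfar, hTsplit]
    simp
  · rw [if_neg hc]
    have hall : (PySem.List.pyRange (b + 1) (n + 1) 1).map
        (fun c => if c - b ≤ d then pvF n d j c true
                  else if false then pvF n d j c false else 0) =
        (PySem.List.pyRange (b + 1) (n + 1) 1).map (fun _ => (0 : Int)) := by
      apply List.map_congr_left
      intro c hcmem
      rw [PySem.List.mem_pyRange_one] at hcmem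
      have : ¬ (c - b ≤ d) := by omega
      simp [this]
    rw [hall]
    simp

-- suffix-sum array build (countdown loop), one component
lemma pvSuffix_build (n : Int) (f : List Int) :
    ∀ (m : Nat) (c0 : Int), 0 ≤ c0 → c0 ≤ n → c0.toNat = m →
    ∀ (st : List Int), st.length = (n + 2).toNat →
    (∀ i : Int, c0 + 1 ≤ i → i ≤ n + 1 →
        st.getD i.toNat 0 = ((PySem.List.pyRange i (n + 1) 1).map (fun c => f.getD c.toNat 0)).sum) →
    ((PySem.List.pyRange c0 0 (-1)).foldl
        (fun st c => st.set c.toNat (st.getD (c + 1).toNat 0 + f.getD c.toNat 0)) st).length = (n + 2).toNat ∧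
    (∀ i : Int, 1 ≤ i → i ≤ n + 1 →
        ((PySem.List.pyRange c0 0 (-1)).foldl
          (fun st c => st.set c.toNat (st.getD (c + 1).toNat 0 + f.getD c.toNat 0)) st).getD i.toNat 0 =
        ((PySem.List.pyRange i (n + 1) 1).map (fun c => f.getD c.toNat 0)).sum) := by
  intro m
  induction m with
  | zero =>
    intro c0 h0 hn hm st hlen hinv
    have : c0 = 0 := by omega
    subst this
    rw [PySem.List.pyRange_neg_one_eq_nil (by omega)]
    exact ⟨hlen, fun i h1 h2 => hinv i (by omega) h2⟩
  | succ m ihm =>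
    intro c0 h0 hn hm st hlen hinv
    have hc0 : 0 < c0 := by omega
    rw [PySem.List.pyRange_neg_one_cons hc0]
    simp only [List.foldl_cons]
    apply ihm (c0 - 1) (by omega) (by omega) (by omega)
    · simp [hlen]
    · intro i h1 h2
      by_cases hieq : i = c0
      · subst hieq
        have hidx : i.toNat < st.length := by rw [hlen]; omega
        rw [List.getD, List.getElem?_set_self (by omega), Option.getD_some]
        rw [hinv (i + 1) (by omega) (by omega)]
        rw [PySem.List.pyRange_one_cons (by omega : i < n + 1)]
        simp only [List.map_cons, List.sum_cons]
        ring
      · have hne : i.toNat ≠ c0.toNat := by omega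
        rw [List.getD, List.getElem?_set_ne (Ne.symm hne), ← List.getD]
        exact hinv i (by omega) h2

-- forward build loop: set index b to g b for b = a..n
lemma pvSet_walk (n : Int) (g : Int → Int) :
    ∀ (m : Nat) (a : Int), 1 ≤ a → (n + 1 - a).toNat = m →
    ∀ (st : List Int), st.length = (n + 2).toNat →
    ((PySem.List.pyRange a (n + 1) 1).foldl (fun st b => st.set b.toNat (g b)) st).length = (n + 2).toNat ∧
    (∀ x : Int, a ≤ x → x ≤ n →
        ((PySem.List.pyRange a (n + 1) 1).foldl (fun st b => st.set b.toNat (g b)) st).getD x.toNat 0 = g x) ∧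
    (∀ x : Int, 0 ≤ x → x < a →
        ((PySem.List.pyRange a (n + 1) 1).foldl (fun st b => st.set b.toNat (g b)) st).getD x.toNat 0 =
          st.getD x.toNat 0) := by
  intro m
  induction m with
  | zero =>
    intro a ha hm st hlen
    rw [PySem.List.pyRange_one_eq_nil (by omega)]
    exact ⟨hlen, fun x h1 h2 => by omega, fun x h1 h2 => rfl⟩
  | succ m ihm =>
    intro a ha hm st hlen
    have hlt : a < n + 1 := by omega
    rw [PySem.List.pyRange_one_cons hlt]
    simp only [List.foldl_cons]
    obtain ⟨hl, hset, hold⟩ := ihm (a + 1) (by omega) (by omega)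
      (st.set a.toNat (g a)) (by simp [hlen])
    refine ⟨hl, ?_, ?_⟩
    · intro x h1 h2
      by_cases hxa : x = a
      · subst hxa
        rw [hold x (by omega) (by omega)]
        rw [List.getD, List.getElem?_set_self (by rw [hlen]; omega), Option.getD_some]
      · exact hset x (by omega) h2
    · intro x h1 h2
      rw [hold x h1 (by omega)]
      have hne : x.toNat ≠ a.toNat := by omega
      rw [List.getD, List.getElem?_set_ne (Ne.symm hne), ← List.getD]

def pvInv (n d : Int) (j : Nat) (ff : List Int × List Int) : Prop :=
  ff.1.length = (n + 2).toNat ∧ ff.2.length = (n + 2).toNat ∧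
  ∀ b : Int, 1 ≤ b → b ≤ n →
    ff.1.getD b.toNat 0 = pvF n d j b true ∧ ff.2.getD b.toNat 0 = pvF n d j b false

-- one level of B's DP, exactly the loop body of the port
def pvStepFn (n d : Int) (ff : List Int × List Int) : List Int × List Int :=
  let s := (PySem.List.pyRange n 0 (-1)).foldl
    (fun (st : List Int × List Int) c =>
      (st.1.set c.toNat (st.1.getD (c + 1).toNat 0 + ff.1.getD c.toNat 0),
       st.2.set c.toNat (st.2.getD (c + 1).toNat 0 + ff.2.getD c.toNat 0)))
    (List.replicate (n + 2).toNat 0, List.replicate (n + 2).toNat 0)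
  (PySem.List.pyRange 1 (n + 1) 1).foldl
    (fun (nf : List Int × List Int) b =>
      let hi := min (b + d) n
      let near := if b + 1 ≤ hi then s.1.getD (b + 1).toNat 0 - s.1.getD (hi + 1).toNat 0 else 0
      let far := if b + 1 ≤ hi then s.2.getD (hi + 1).toNat 0 else s.2.getD (b + 1).toNat 0
      (nf.1.set b.toNat (near + far), nf.2.set b.toNat near))
    (List.replicate (n + 2).toNat 0, List.replicate (n + 2).toNat 0)

lemma pvBuild_inv (n d : Int) (j : Nat) (G1 G2 : Int → Int)
    (h1 : ∀ b : Int, 1 ≤ b → b ≤ n → G1 b = pvF n d (j + 1) b true)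
    (h2 : ∀ b : Int, 1 ≤ b → b ≤ n → G2 b = pvF n d (j + 1) b false) :
    pvInv n d (j + 1)
      ((PySem.List.pyRange 1 (n + 1) 1).foldl
        (fun (nf : List Int × List Int) b => (nf.1.set b.toNat (G1 b), nf.2.set b.toNat (G2 b)))
        (List.replicate (n + 2).toNat 0, List.replicate (n + 2).toNat 0)) := by
  rw [PySem.List.foldl_prod_mk
    (f := fun (l : List Int) (b : Int) => l.set b.toNat (G1 b))
    (g := fun (l : List Int) (b : Int) => l.set b.toNat (G2 b))]
  obtain ⟨hL1, hS1, _⟩ := pvSet_walk n G1 (n + 1 - 1).toNat 1 le_rfl rfl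
    (List.replicate (n + 2).toNat 0) (by simp)
  obtain ⟨hL2, hS2, _⟩ := pvSet_walk n G2 (n + 1 - 1).toNat 1 le_rfl rfl
    (List.replicate (n + 2).toNat 0) (by simp)
  exact ⟨hL1, hL2, fun b hb1 hb2 =>
    ⟨by rw [hS1 b hb1 hb2, h1 b hb1 hb2], by rw [hS2 b hb1 hb2, h2 b hb1 hb2]⟩⟩

lemma pvLevel_step (n d : Int) (hn : 1 ≤ n) (j : Nat) (ff : List Int × List Int)
    (h : pvInv n d j ff) : pvInv n d (j + 1) (pvStepFn n d ff) := by
  obtain ⟨hl1, hl2, hvals⟩ := h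
  unfold pvStepFn
  simp only []
  rw [PySem.List.foldl_prod_mk
    (f := fun (l : List Int) (c : Int) => l.set c.toNat (l.getD (c + 1).toNat 0 + ff.1.getD c.toNat 0))
    (g := fun (l : List Int) (c : Int) => l.set c.toNat (l.getD (c + 1).toNat 0 + ff.2.getD c.toNat 0))]
  have hinit : ∀ (f : List Int), ∀ i : Int, n + 1 ≤ i → i ≤ n + 1 →
      (List.replicate (n + 2).toNat (0 : Int)).getD i.toNat 0 =
      ((PySem.List.pyRange i (n + 1) 1).map (fun c => f.getD c.toNat 0)).sum := by
    intro f i h1 h2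
    rw [PySem.List.pyRange_one_eq_nil (by omega)]
    simp only [List.getD, List.getElem?_replicate, List.map_nil, List.sum_nil]
    split <;> rfl
  obtain ⟨hTl, hTv⟩ := pvSuffix_build n ff.1 n.toNat n (by omega) le_rfl rfl
    (List.replicate (n + 2).toNat 0) (by simp) (by
      intro i h1 h2; exact hinit ff.1 i (by omega) h2)
  obtain ⟨hFl, hFv⟩ := pvSuffix_build n ff.2 n.toNat n (by omega) le_rfl rfl
    (List.replicate (n + 2).toNat 0) (by simp) (by
      intro i h1 h2; exact hinit ff.2 i (by omega) h2)
  have hT : ∀ i : Int, 1 ≤ i → i ≤ n + 1 →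
      ((PySem.List.pyRange n 0 (-1)).foldl
        (fun st c => st.set c.toNat (st.getD (c + 1).toNat 0 + ff.1.getD c.toNat 0))
        (List.replicate (n + 2).toNat 0)).getD i.toNat 0 = pvSumT n d j i := by
    intro i h1 h2
    rw [hTv i h1 h2, pvSumT]
    apply congrArg
    apply List.map_congr_left
    intro c hc
    rw [PySem.List.mem_pyRange_one] at hc
    exact (hvals c (by omega) (by omega)).1
  have hF : ∀ i : Int, 1 ≤ i → i ≤ n + 1 →
      ((PySem.List.pyRange n 0 (-1)).foldl
        (fun st c => st.set c.toNat (st.getD (c + 1).toNat 0 + ff.2.getD c.toNat 0))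
        (List.replicate (n + 2).toNat 0)).getD i.toNat 0 = pvSumF n d j i := by
    intro i h1 h2
    rw [hFv i h1 h2, pvSumF]
    apply congrArg
    apply List.map_congr_left
    intro c hc
    rw [PySem.List.mem_pyRange_one] at hc
    exact (hvals c (by omega) (by omega)).2
  apply pvBuild_inv n d j
  · intro b hb1 hb2
    simp only []
    by_cases hcond : b + 1 ≤ min (b + d) n
    · rw [if_pos hcond, if_pos hcond, pvF_true_split,
        if_pos hcond, hT (b + 1) (by omega) (by omega),
        hT (min (b + d) n + 1) (by omega) (by omega),
        hF (min (b + d) n + 1) (by omega) (by omega)]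
    · rw [if_neg hcond, if_neg hcond, pvF_true_split,
        if_neg hcond, hF (b + 1) (by omega) (by omega)]
      ring
  · intro b hb1 hb2
    simp only []
    by_cases hcond : b + 1 ≤ min (b + d) n
    · rw [if_pos hcond, pvF_false_split, if_pos hcond,
        hT (b + 1) (by omega) (by omega),
        hT (min (b + d) n + 1) (by omega) (by omega)]
    · rw [if_neg hcond, pvF_false_split, if_neg hcond]

lemma pvLevels (n d : Int) (hn : 1 ≤ n) :
    ∀ (lst : List Int) (ff : List Int × List Int) (j : Nat), pvInv n d j ff →
      pvInv n d (j + lst.length) (lst.foldl (fun ff _ => pvStepFn n d ff) ff) := by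
  intro lst
  induction lst with
  | nil => intro ff j h; simpa using h
  | cons a l ih =>
    intro ff j h
    simp only [List.foldl_cons, List.length_cons]
    rw [show j + (l.length + 1) = (j + 1) + l.length by omega]
    exact ih (pvStepFn n d ff) (j + 1) (pvLevel_step n d hn j ff h)


lemma pvAlt_eq (n k d : Int) (hk : 0 ≤ k) (hk0 : k ≠ 0) (hnk : ¬ n < k) :
    clustered_subset_count_alt n k d =
      (PySem.List.pyRange 1 (n + 1) 1).foldl
        (fun acc x => acc + pvF n d (k - 1).toNat x false) 0 := by
  have hn : 1 ≤ n := by omega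
  unfold clustered_subset_count_alt
  rw [if_neg hk0, if_neg hnk]
  show (PySem.List.pyRange 1 (n + 1) 1).foldl
      (fun acc x => acc +
        ((PySem.List.pyRange 0 (k - 1) 1).foldl (fun ff _ => pvStepFn n d ff)
          (List.replicate (n + 2).toNat 1, List.replicate (n + 2).toNat 0)).2.getD x.toNat 0) 0 = _
  have hinit : pvInv n d 0 (List.replicate (n + 2).toNat 1, List.replicate (n + 2).toNat 0) := by
    refine ⟨by simp, by simp, fun b hb1 hb2 => ?_⟩
    constructor <;>
      · simp only [pvF, List.getD, List.getElem?_replicate]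
        split
        · rfl
        · omega
  have hfin := pvLevels n d hn (PySem.List.pyRange 0 (k - 1) 1) _ 0 hinit
  rw [PySem.List.length_pyRange_one, show k - 1 - (0:Int) = k - 1 from by ring] at hfin
  obtain ⟨-, -, hvals⟩ := hfin
  apply PySem.List.foldl_congr_mem
  intro acc x hx
  rw [PySem.List.mem_pyRange_one] at hx
  have := (hvals x (by omega) (by omega)).2
  rw [Nat.zero_add] at this
  rw [this]

lemma pvMain (n k d : Int) (hk : 0 ≤ k) :
    clustered_subset_count n k d = clustered_subset_count_alt n k d := by
  unfold clustered_subset_count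
  rw [PySem.List.foldl_if_add_one]
  by_cases hk0 : k = 0
  · subst hk0
    simp [pvComb, pvIsClustered, clustered_subset_count_alt]
  · by_cases hnk : n < k
    · rw [pvComb_eq_nil (by rw [PySem.List.length_pyRange_one]; omega)]
      unfold clustered_subset_count_alt
      rw [if_neg hk0, if_pos hnk]
      simp
    · rw [pvAlt_eq n k d hk hk0 hnk]
      have hK : k.toNat = (k - 1).toNat + 1 := by omega
      rw [hK]
      have hcongr : List.countP (fun s => pvIsClustered s d)
          (pvComb (PySem.List.pyRange 1 (n + 1) 1) ((k - 1).toNat + 1)) =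
          List.countP (pvClusB d)
          (pvComb (PySem.List.pyRange 1 (n + 1) 1) ((k - 1).toNat + 1)) := by
        apply List.countP_congr
        intro t ht
        obtain ⟨hsub, hlen⟩ := pvComb_mem ht
        have hp : List.Pairwise (· < ·) t :=
          (PySem.List.pairwise_lt_pyRange_one 1 (n + 1)).sublist hsub
        match t with
        | [] => simp at hlen
        | y :: u => simp [pvClusB, pvIsClustered_eq_okFrom hp]
      rw [hcongr, pvTop_walk n d (k - 1).toNat (n + 1 - 1).toNat 1 rfl]
      simp


-- ===== VERDICT (by name: the statement is the Claim_ definition above) =====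
theorem clustered_subset_count_spec : Claim_equal_clustered_subset_count := by
  intro n k d _ hpre
  exact pvMain n k d hpre
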